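-- pv_equiv track=rewrite | github.com/jangdayeon/Algorithm | 프로그래머스/1/133499. 옹알이 （2）/옹알이 （2）.py | solution
-- ===== SOURCE A (Python) =====
-- def solution(babbling):
--     result = 0
--     cs2 = ["ye", "ma"] #초기화
--     cs3 = ["aya","woo"] #초기화
--     for i in range(len(babbling)):
--         while True:
--             if len(babbling[i]) == 0:
--                 result +=1
--                 break
--             elif babbling[i][0:2] in cs2 :
--                 if babbling[i][2:4] == babbling[i][0:2]:
--                     break
--                 babbling[i] = babbling[i][2:]
--             elif babbling[i][0:3] in cs3 :
--                 if babbling[i][3:6] == babbling[i][0:3]: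
--                     break
--                 babbling[i] = babbling[i][3:]
--             else:
--                 break
--     return result
-- ===== SOURCE B (Python) =====
-- WORD_BY_FIRST_CHAR = {'a': 'aya', 'y': 'ye', 'w': 'woo', 'm': 'ma'}
--
-- def solution(babbling):
--     # Single forward scan per string with an index pointer: dispatch on the
--     # current character via a dict, never slice or rebuild the string.
--     get = WORD_BY_FIRST_CHAR.get
--     result = 0
--     for s in babbling:
--         i, n, last = 0, len(s), ''
--         good = True
--         while i < n:
--             w = get(s[i])
--             if w is None or w == last or not s.startswith(w, i):
--                 good = False
--                 break
--             i += len(w)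
--             last = w
--         result += good
--     return result
-- ===== Notes on version B (the rewrite author's own statement) =====
-- stated objective: faster
-- what changed: Instead of repeatedly testing 2- and 3-character slices against word lists and rebuilding the remaining string after each match, B makes a single forward scan per string with an index pointer, dispatching on the current character through a dict and checking with startswith at the offset.
import Mathlib
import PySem

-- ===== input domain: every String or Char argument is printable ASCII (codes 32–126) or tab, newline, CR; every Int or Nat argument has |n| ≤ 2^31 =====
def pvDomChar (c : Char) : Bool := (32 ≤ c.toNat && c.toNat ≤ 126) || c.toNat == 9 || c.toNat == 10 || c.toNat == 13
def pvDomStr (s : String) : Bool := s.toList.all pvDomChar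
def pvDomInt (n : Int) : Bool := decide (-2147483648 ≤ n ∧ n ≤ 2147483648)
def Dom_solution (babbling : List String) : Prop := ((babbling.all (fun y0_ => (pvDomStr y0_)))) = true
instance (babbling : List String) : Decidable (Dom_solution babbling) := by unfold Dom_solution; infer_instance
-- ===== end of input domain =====

-- B replaces A's repeated slicing/rebuilding of each string with a single forward
-- scan keeping an index pointer and the last matched word (objective: faster).
-- A mutates its argument list in place; the equivalence proved here is about the
-- RETURN value only (B does not mutate).

-- ===== PORT A =====
def pvCs2 : List (List Char) := [['y','e'], ['m','a']]
def pvCs3 : List (List Char) := [['a','y','a'], ['w','o','o']]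

-- A's 'while True' loop on one string: its contribution to result (1 or 0)
def pvAGo (s : List Char) : Int :=
  if s.length = 0 then 1
  else if PySem.List.slice s (some 0) (some 2) ∈ pvCs2 then
    (if PySem.List.slice s (some 2) (some 4) = PySem.List.slice s (some 0) (some 2) then 0
     else pvAGo (PySem.List.slice s (some 2) none))
  else if PySem.List.slice s (some 0) (some 3) ∈ pvCs3 then
    (if PySem.List.slice s (some 3) (some 6) = PySem.List.slice s (some 0) (some 3) then 0
     else pvAGo (PySem.List.slice s (some 3) none))
  else 0
termination_by s.length
decreasing_by
  · rw [PySem.List.slice_from s (by norm_num)]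
    rename_i hlen _ _
    simp only [List.length_drop]; omega
  · rw [PySem.List.slice_from s (by norm_num)]
    rename_i hlen _ _ _
    simp only [List.length_drop]; omega

def solution (babbling : List String) : Int :=
  babbling.foldl (fun result s => result + pvAGo s.toList) 0

-- ===== PORT B =====
def pvWa : List Char := ['a','y','a']
def pvWy : List Char := ['y','e']
def pvWw : List Char := ['w','o','o']
def pvWm : List Char := ['m','a']

-- WORD_BY_FIRST_CHAR
def pvW : PySem.Dict Char (List Char) :=
  PySem.Dict.ofList [('a', pvWa), ('y', pvWy), ('w', pvWw), ('m', pvWm)]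

-- every word in the dict is non-empty (needed for termination of the scan)
theorem pvW_get_words {c : Char} {w : List Char} (h : PySem.Dict.get? pvW c = some w) :
    w = pvWa ∨ w = pvWy ∨ w = pvWw ∨ w = pvWm := by
  have hmk : pvW = PySem.Dict.mk [('a', pvWa), ('y', pvWy), ('w', pvWw), ('m', pvWm)] := by decide
  rw [hmk] at h
  simp only [PySem.Dict.get?_mk_cons] at h
  split_ifs at h <;> simp_all [PySem.Dict.get?]

theorem pvW_get_ne_nil {c : Char} {w : List Char} (h : PySem.Dict.get? pvW c = some w) :
    w ≠ [] := by
  rcases pvW_get_words h with rfl | rfl | rfl | rfl <;> simp [pvWa, pvWy, pvWw, pvWm]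

-- B's while-loop: `rest` is s[i:], `last` the last matched word ('' initially)
def pvBGo : List Char → List Char → Bool
  | [], _ => true
  | c :: cs, last =>
    match h : PySem.Dict.get? pvW c with
    | none => false
    | some w =>
      if w = last ∨ ¬ w.isPrefixOf (c :: cs) then false
      else pvBGo ((c :: cs).drop w.length) w
termination_by rest _ => rest.length
decreasing_by
  have hw := pvW_get_ne_nil h
  simp only [List.length_drop]
  cases w with
  | nil => exact absurd rfl hw
  | cons a t => simp only [List.length_cons]; omega

def solution_alt (babbling : List String) : Int :=
  (babbling.map (fun s => if pvBGo s.toList [] then (1 : Int) else 0)).sum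

-- ===== PRECONDITION & SPEC =====
def Spec_solution (babbling : List String) (out : Int) : Prop := out = solution_alt babbling
instance (babbling : List String) (out : Int) : Decidable (Spec_solution babbling out) := by unfold Spec_solution; infer_instance

-- ===== CLAIM (what is proved, stated in full; the proofs are below) =====
def Claim_equal_solution : Prop := ∀ (babbling : List String), Dom_solution babbling → Spec_solution babbling (solution babbling)

-- ===== LEMMAS AND PROOFS =====

-- A's slices written as take/drop
theorem pvAGo_eq (s : List Char) : pvAGo s =
    if s = [] then 1
    else if s.take 2 ∈ pvCs2 then
      (if (s.drop 2).take 2 = s.take 2 then 0 else pvAGo (s.drop 2))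
    else if s.take 3 ∈ pvCs3 then
      (if (s.drop 3).take 3 = s.take 3 then 0 else pvAGo (s.drop 3))
    else 0 := by
  rw [pvAGo]
  rw [PySem.List.slice_toNat s (by norm_num) (by norm_num),
      PySem.List.slice_toNat s (by norm_num) (by norm_num),
      PySem.List.slice_toNat s (by norm_num) (by norm_num),
      PySem.List.slice_toNat s (by norm_num) (by norm_num),
      PySem.List.slice_from s (by norm_num), PySem.List.slice_from s (by norm_num)]
  have e2 : Int.toNat 2 = 2 := by decide
  have e3 : Int.toNat 3 = 3 := by decide
  have e4 : Int.toNat 4 = 4 := by decide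
  have e6 : Int.toNat 6 = 6 := by decide
  simp only [e2, e3, e4, e6]
  norm_num [List.length_eq_zero_iff]

theorem pvBGo_nil (last : List Char) : pvBGo [] last = true := by
  rw [pvBGo.eq_def]

theorem pvBGo_cons_none {c : Char} (cs last : List Char)
    (h : PySem.Dict.get? pvW c = none) : pvBGo (c :: cs) last = false := by
  rw [pvBGo]
  split
  · rfl
  · next w heq => rw [h] at heq; cases heq

theorem pvBGo_cons_some {c : Char} {w : List Char} (cs last : List Char)
    (h : PySem.Dict.get? pvW c = some w) :
    pvBGo (c :: cs) last =
      (if w = last ∨ ¬ w.isPrefixOf (c :: cs) then false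
       else pvBGo ((c :: cs).drop w.length) w) := by
  rw [pvBGo]
  split
  · next heq => rw [h] at heq; cases heq
  · next w' heq =>
      rw [h] at heq
      cases heq
      rfl

-- skipping the `w == last` test does not matter when `last` is not a prefix of `rest`
theorem pvBGo_skip (rest last : List Char) (hl : ¬ last.isPrefixOf rest) :
    pvBGo rest last = pvBGo rest [] := by
  cases rest with
  | nil => rw [pvBGo_nil, pvBGo_nil]
  | cons c cs =>
    cases hget : PySem.Dict.get? pvW c with
    | none => rw [pvBGo_cons_none cs last hget, pvBGo_cons_none cs [] hget]
    | some w =>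
      rw [pvBGo_cons_some cs last hget, pvBGo_cons_some cs [] hget]
      have hwne := pvW_get_ne_nil hget
      by_cases hp : w.isPrefixOf (c :: cs)
      · have h1 : w ≠ last := fun he => hl (he ▸ hp)
        simp [h1, hwne, hp]
      · simp [hp]

theorem pvTakePrefix {s w : List Char} {k : Nat} (hk : w.length = k) : s.take k = w ↔ w <+: s := by
  subst hk; rw [List.prefix_iff_eq_take]; exact eq_comm

-- one loop step of B after a word has been consumed, per word
theorem pvStep_wy (t : List Char) :
    pvBGo (pvWy ++ t) [] = if pvWy.isPrefixOf t then false else pvBGo t [] := by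
  have hget : PySem.Dict.get? pvW 'y' = some pvWy := by decide
  rw [(by simp [pvWy] : pvWy ++ t = 'y' :: 'e' :: t)]
  rw [pvBGo_cons_some _ [] hget]
  have hpre : pvWy.isPrefixOf ('y' :: 'e' :: t) := by simp [pvWy, List.isPrefixOf]
  rw [if_neg (by simp [pvWy, hpre])]
  rw [(by simp [pvWy] : ('y' :: 'e' :: t).drop pvWy.length = t)]
  by_cases hp : pvWy.isPrefixOf t
  · rw [if_pos hp]
    obtain ⟨u, rfl⟩ := List.isPrefixOf_iff_prefix.mp hp
    rw [(by simp [pvWy] : pvWy ++ u = 'y' :: 'e' :: u)]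
    rw [pvBGo_cons_some _ _ hget]
    rw [if_pos (Or.inl rfl)]
  · rw [if_neg hp]
    exact pvBGo_skip t pvWy hp

theorem pvStep_wm (t : List Char) :
    pvBGo (pvWm ++ t) [] = if pvWm.isPrefixOf t then false else pvBGo t [] := by
  have hget : PySem.Dict.get? pvW 'm' = some pvWm := by decide
  rw [(by simp [pvWm] : pvWm ++ t = 'm' :: 'a' :: t)]
  rw [pvBGo_cons_some _ [] hget]
  have hpre : pvWm.isPrefixOf ('m' :: 'a' :: t) := by simp [pvWm, List.isPrefixOf]
  rw [if_neg (by simp [pvWm, hpre])]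
  rw [(by simp [pvWm] : ('m' :: 'a' :: t).drop pvWm.length = t)]
  by_cases hp : pvWm.isPrefixOf t
  · rw [if_pos hp]
    obtain ⟨u, rfl⟩ := List.isPrefixOf_iff_prefix.mp hp
    rw [(by simp [pvWm] : pvWm ++ u = 'm' :: 'a' :: u)]
    rw [pvBGo_cons_some _ _ hget]
    rw [if_pos (Or.inl rfl)]
  · rw [if_neg hp]
    exact pvBGo_skip t pvWm hp

theorem pvStep_wa (t : List Char) :
    pvBGo (pvWa ++ t) [] = if pvWa.isPrefixOf t then false else pvBGo t [] := by
  have hget : PySem.Dict.get? pvW 'a' = some pvWa := by decide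
  rw [(by simp [pvWa] : pvWa ++ t = 'a' :: 'y' :: 'a' :: t)]
  rw [pvBGo_cons_some _ [] hget]
  have hpre : pvWa.isPrefixOf ('a' :: 'y' :: 'a' :: t) := by simp [pvWa, List.isPrefixOf]
  rw [if_neg (by simp [pvWa, hpre])]
  rw [(by simp [pvWa] : ('a' :: 'y' :: 'a' :: t).drop pvWa.length = t)]
  by_cases hp : pvWa.isPrefixOf t
  · rw [if_pos hp]
    obtain ⟨u, rfl⟩ := List.isPrefixOf_iff_prefix.mp hp
    rw [(by simp [pvWa] : pvWa ++ u = 'a' :: 'y' :: 'a' :: u)]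
    rw [pvBGo_cons_some _ _ hget]
    rw [if_pos (Or.inl rfl)]
  · rw [if_neg hp]
    exact pvBGo_skip t pvWa hp

theorem pvStep_ww (t : List Char) :
    pvBGo (pvWw ++ t) [] = if pvWw.isPrefixOf t then false else pvBGo t [] := by
  have hget : PySem.Dict.get? pvW 'w' = some pvWw := by decide
  rw [(by simp [pvWw] : pvWw ++ t = 'w' :: 'o' :: 'o' :: t)]
  rw [pvBGo_cons_some _ [] hget]
  have hpre : pvWw.isPrefixOf ('w' :: 'o' :: 'o' :: t) := by simp [pvWw, List.isPrefixOf]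
  rw [if_neg (by simp [pvWw, hpre])]
  rw [(by simp [pvWw] : ('w' :: 'o' :: 'o' :: t).drop pvWw.length = t)]
  by_cases hp : pvWw.isPrefixOf t
  · rw [if_pos hp]
    obtain ⟨u, rfl⟩ := List.isPrefixOf_iff_prefix.mp hp
    rw [(by simp [pvWw] : pvWw ++ u = 'w' :: 'o' :: 'o' :: u)]
    rw [pvBGo_cons_some _ _ hget]
    rw [if_pos (Or.inl rfl)]
  · rw [if_neg hp]
    exact pvBGo_skip t pvWw hp

theorem pvMainAux : ∀ (n : Nat) (s : List Char), s.length ≤ n →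
    pvAGo s = if pvBGo s [] then 1 else 0 := by
  intro n
  induction n with
  | zero =>
    intro s hs
    have hnil : s = [] := List.length_eq_zero_iff.mp (Nat.le_zero.mp hs)
    simp [hnil, pvAGo_eq, pvBGo_nil]
  | succ n ih =>
    intro s hs
    rw [pvAGo_eq]
    by_cases hnil : s = []
    · simp [hnil, pvBGo_nil]
    · rw [if_neg hnil]
      by_cases h2 : s.take 2 ∈ pvCs2
      · rw [if_pos h2]
        simp only [pvCs2, List.mem_cons, List.mem_singleton, List.not_mem_nil, or_false] at h2
        rcases h2 with h | h
        · obtain ⟨t, rfl⟩ := (pvTakePrefix (w := pvWy) (k := 2) rfl).mp (by simpa [pvWy] using h)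
          rw [pvStep_wy]
          have hd : (pvWy ++ t).drop 2 = t := by simp [pvWy]
          have ht : (pvWy ++ t).take 2 = pvWy := by simp [pvWy]
          rw [hd, ht]
          by_cases hrep : pvWy.isPrefixOf t
          · rw [if_pos ((pvTakePrefix (w := pvWy) (k := 2) rfl).mpr (List.isPrefixOf_iff_prefix.mp hrep)),
              if_pos hrep]
            simp
          · rw [if_neg (fun hh => hrep (List.isPrefixOf_iff_prefix.mpr ((pvTakePrefix (k := 2) rfl).mp hh))),
              if_neg hrep]
            exact ih t (by simp [pvWy] at hs; omega)
        · obtain ⟨t, rfl⟩ := (pvTakePrefix (w := pvWm) (k := 2) rfl).mp (by simpa [pvWm] using h)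
          rw [pvStep_wm]
          have hd : (pvWm ++ t).drop 2 = t := by simp [pvWm]
          have ht : (pvWm ++ t).take 2 = pvWm := by simp [pvWm]
          rw [hd, ht]
          by_cases hrep : pvWm.isPrefixOf t
          · rw [if_pos ((pvTakePrefix (w := pvWm) (k := 2) rfl).mpr (List.isPrefixOf_iff_prefix.mp hrep)),
              if_pos hrep]
            simp
          · rw [if_neg (fun hh => hrep (List.isPrefixOf_iff_prefix.mpr ((pvTakePrefix (k := 2) rfl).mp hh))),
              if_neg hrep]
            exact ih t (by simp [pvWm] at hs; omega)
      · rw [if_neg h2]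
        by_cases h3 : s.take 3 ∈ pvCs3
        · rw [if_pos h3]
          simp only [pvCs3, List.mem_cons, List.mem_singleton, List.not_mem_nil, or_false] at h3
          rcases h3 with h | h
          · obtain ⟨t, rfl⟩ := (pvTakePrefix (w := pvWa) (k := 3) rfl).mp (by simpa [pvWa] using h)
            rw [pvStep_wa]
            have hd : (pvWa ++ t).drop 3 = t := by simp [pvWa]
            have ht : (pvWa ++ t).take 3 = pvWa := by simp [pvWa]
            rw [hd, ht]
            by_cases hrep : pvWa.isPrefixOf t
            · rw [if_pos ((pvTakePrefix (w := pvWa) (k := 3) rfl).mpr (List.isPrefixOf_iff_prefix.mp hrep)),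
                if_pos hrep]
              simp
            · rw [if_neg (fun hh => hrep (List.isPrefixOf_iff_prefix.mpr ((pvTakePrefix (k := 3) rfl).mp hh))),
                if_neg hrep]
              exact ih t (by simp [pvWa] at hs; omega)
          · obtain ⟨t, rfl⟩ := (pvTakePrefix (w := pvWw) (k := 3) rfl).mp (by simpa [pvWw] using h)
            rw [pvStep_ww]
            have hd : (pvWw ++ t).drop 3 = t := by simp [pvWw]
            have ht : (pvWw ++ t).take 3 = pvWw := by simp [pvWw]
            rw [hd, ht]
            by_cases hrep : pvWw.isPrefixOf t
            · rw [if_pos ((pvTakePrefix (w := pvWw) (k := 3) rfl).mpr (List.isPrefixOf_iff_prefix.mp hrep)),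
                if_pos hrep]
              simp
            · rw [if_neg (fun hh => hrep (List.isPrefixOf_iff_prefix.mpr ((pvTakePrefix (k := 3) rfl).mp hh))),
                if_neg hrep]
              exact ih t (by simp [pvWw] at hs; omega)
        · rw [if_neg h3]
          have hpw : ∀ w : List Char, w.isPrefixOf s → s.take w.length = w := fun w hp =>
            (pvTakePrefix rfl).mpr (List.isPrefixOf_iff_prefix.mp hp)
          have na : ¬ pvWa.isPrefixOf s := fun hp => h3 (by
            have := hpw _ hp; simp [pvWa] at this
            simp [pvCs3, this])
          have nw : ¬ pvWw.isPrefixOf s := fun hp => h3 (by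
            have := hpw _ hp; simp [pvWw] at this
            simp [pvCs3, this])
          have ny : ¬ pvWy.isPrefixOf s := fun hp => h2 (by
            have := hpw _ hp; simp [pvWy] at this
            simp [pvCs2, this])
          have nm : ¬ pvWm.isPrefixOf s := fun hp => h2 (by
            have := hpw _ hp; simp [pvWm] at this
            simp [pvCs2, this])
          obtain ⟨c, cs, rfl⟩ : ∃ c cs, s = c :: cs := by
            cases s with
            | nil => exact absurd rfl hnil
            | cons c cs => exact ⟨c, cs, rfl⟩
          cases hget : PySem.Dict.get? pvW c with
          | none => rw [pvBGo_cons_none cs [] hget]; simp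
          | some w =>
            rw [pvBGo_cons_some cs [] hget]
            rcases pvW_get_words hget with rfl | rfl | rfl | rfl
            · simp [na]
            · simp [ny]
            · simp [nw]
            · simp [nm]

theorem pvMain (s : List Char) : pvAGo s = if pvBGo s [] then 1 else 0 :=
  pvMainAux s.length s le_rfl

theorem pvFold (l : List String) (r : Int) :
    l.foldl (fun result s => result + pvAGo s.toList) r =
      r + (l.map (fun s => if pvBGo s.toList [] then (1 : Int) else 0)).sum := by
  induction l generalizing r with
  | nil => simp
  | cons x t ih =>
    rw [List.foldl_cons, ih, List.map_cons, List.sum_cons, pvMain]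
    ring

-- ===== VERDICT (by name: the statement is the Claim_ definition above) =====
theorem solution_spec : Claim_equal_solution := by
  intro babbling _
  unfold Spec_solution solution solution_alt
  rw [pvFold]; ring
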